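-- pv_equiv track=rewrite | github.com/NasipCOM/Python-4-Me | fun4.py | fun4
-- ===== SOURCE A (Python) =====
-- def fun4(number_list1, number_list2, x_list):
--     x = x_list[1]
--     y = []
--     for i in range((x * 2) + 1):
--         y.append(x * -1 + i)
--     number_list3 = []
--     for i in range(len(number_list1)):
--         for j in range(len(y)):
--             try:
--                 if number_list1[i] == number_list2[i + y[j]] and i + y[j] >= 0:
--                     number_list3.append(i + 1)
--             except:
--                 pass
--     return number_list3
-- ===== SOURCE B (Python) =====
-- def fun4(number_list1, number_list2, x_list):
--     x = x_list[1]
--     positions = {}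
--     for j, w in enumerate(number_list2):
--         positions.setdefault(w, []).append(j)
--     result = []
--     for i, v in enumerate(number_list1):
--         for j in positions.get(v, ()):
--             if i - x <= j <= i + x:
--                 result.append(i + 1)
--     return result
-- ===== Notes on version B (the rewrite author's own statement) =====
-- stated objective: faster
-- what changed: A scans, for every element of number_list1, all 2x+1 window offsets into number_list2 under a try/except; B builds a value->occurrence-indices dict over number_list2 once and, per element, emits matches from that value's occurrence list filtered by the window, so the per-element work no longer depends on x.
import Mathlib
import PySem

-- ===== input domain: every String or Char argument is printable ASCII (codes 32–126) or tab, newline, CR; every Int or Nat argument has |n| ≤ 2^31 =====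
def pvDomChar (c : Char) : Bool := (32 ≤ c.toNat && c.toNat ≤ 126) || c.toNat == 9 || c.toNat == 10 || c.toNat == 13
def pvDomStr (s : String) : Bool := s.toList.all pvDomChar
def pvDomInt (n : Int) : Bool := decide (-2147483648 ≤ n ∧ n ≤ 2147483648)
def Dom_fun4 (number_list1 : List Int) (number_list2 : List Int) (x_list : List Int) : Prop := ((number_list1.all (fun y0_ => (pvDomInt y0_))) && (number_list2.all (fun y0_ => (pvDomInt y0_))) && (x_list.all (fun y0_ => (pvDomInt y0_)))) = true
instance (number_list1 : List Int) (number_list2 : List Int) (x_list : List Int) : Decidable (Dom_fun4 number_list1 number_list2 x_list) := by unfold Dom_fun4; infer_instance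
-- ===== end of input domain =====

-- B replaces A's per-element offset-window scan over number_list2 (guarded by try/except) by a
-- value→occurrence-indices dict built once over number_list2, filtered by the window per element (objective: faster).


-- ===== PORT A =====
def fun4 (number_list1 : List Int) (number_list2 : List Int) (x_list : List Int) : List Int :=
  let x := PySem.List.pyGetD x_list 1 0   -- x = x_list[1]; Pre_ guarantees the index is in range
  let y := (PySem.List.pyRange 0 (x * 2 + 1) 1).map (fun t => x * (-1) + t)
  (PySem.List.pyRange 0 (PySem.List.len number_list1) 1).foldl (fun acc i =>
    (PySem.List.pyRange 0 (PySem.List.len y) 1).foldl (fun acc2 j =>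
      match PySem.List.pyGet? number_list1 i, PySem.List.pyGet? y j with
      | some v, some d =>
        -- try: number_list2[i + y[j]] — IndexError (pyGet? = none) is swallowed by the bare except
        match PySem.List.pyGet? number_list2 (i + d) with
        | some w => if v == w && decide (0 ≤ i + d) then acc2 ++ [i + 1] else acc2
        | none => acc2
      | _, _ => acc2) acc) []

-- ===== PORT B =====
def fun4_alt (number_list1 : List Int) (number_list2 : List Int) (x_list : List Int) : List Int :=
  let x := PySem.List.pyGetD x_list 1 0
  let positions := (PySem.List.enumerate number_list2 0).foldl
      (fun (d : PySem.Dict Int (List Int)) jw => d.modify jw.2 [] (· ++ [jw.1])) PySem.Dict.empty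
  (PySem.List.enumerate number_list1 0).foldl (fun acc iv =>
    (positions.getD iv.2 []).foldl (fun acc2 j =>
      if decide (iv.1 - x ≤ j ∧ j ≤ iv.1 + x) then acc2 ++ [iv.1 + 1] else acc2) acc) []

-- ===== PRECONDITION & SPEC =====
-- Pre_ excludes exactly the inputs where A raises IndexError at 'x = x_list[1]': x_list shorter than 2.
def Pre_fun4 (number_list1 : List Int) (number_list2 : List Int) (x_list : List Int) : Prop :=
  2 ≤ x_list.length
instance (number_list1 : List Int) (number_list2 : List Int) (x_list : List Int) : Decidable (Pre_fun4 number_list1 number_list2 x_list) := by unfold Pre_fun4; infer_instance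
def pvWitness_fun4 : List Int × List Int × List Int := ([1, 2, 3], [2, 1, 3], [0, 1])

def Spec_fun4 (number_list1 : List Int) (number_list2 : List Int) (x_list : List Int) (out : List Int) : Prop := out = fun4_alt number_list1 number_list2 x_list
instance (number_list1 : List Int) (number_list2 : List Int) (x_list : List Int) (out : List Int) : Decidable (Spec_fun4 number_list1 number_list2 x_list out) := by unfold Spec_fun4; infer_instance

-- ===== CLAIM (what is proved, stated in full; the proofs are below) =====
def Claim_equal_fun4 : Prop := ∀ (number_list1 : List Int) (number_list2 : List Int) (x_list : List Int), Dom_fun4 number_list1 number_list2 x_list → Pre_fun4 number_list1 number_list2 x_list → Spec_fun4 number_list1 number_list2 x_list (fun4 number_list1 number_list2 x_list)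

-- ===== LEMMAS AND PROOFS =====

-- A appends i+1 at offset d exactly when i+d is a true (nonnegative, in-range) index holding v:
-- a pyGet? hit at a negative i+d (Python wraparound) is discarded by A's own 'i + y[j] >= 0' test.
theorem matchA_eq (l2 : List Int) (v : Int) (i d : Int) (acc2 : List Int) :
    (match PySem.List.pyGet? l2 (i + d) with
      | some w => if v == w && decide (0 ≤ i + d) then acc2 ++ [i + 1] else acc2
      | none => acc2)
    = (if decide (0 ≤ i + d ∧ i + d < l2.length ∧ l2.getD (i + d).toNat 0 = v)
        then acc2 ++ [i + 1] else acc2) := by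
  rcases h : PySem.List.pyGet? l2 (i + d) with _ | w
  · rw [PySem.List.pyGet?_eq_none_iff] at h
    simp only [PySem.Raise.InRange] at h
    have hc : ¬ (0 ≤ i + d ∧ i + d < (l2.length : Int) ∧ l2.getD (i + d).toNat 0 = v) := by
      rintro ⟨h1, h2, _⟩; exact h ⟨by omega, h2⟩
    simp only [hc, decide_false, Bool.false_eq_true, if_false]
  · by_cases hnn : 0 ≤ i + d
    · have hr := h
      rw [PySem.List.pyGet?_of_nonneg _ hnn] at hr
      have hlt : (i + d).toNat < l2.length := by
        by_contra hge
        have hle : l2.length ≤ (i + d).toNat := by omega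
        rw [List.getElem?_eq_none hle] at hr
        simp at hr
      have hw : l2[(i+d).toNat] = w := by
        simpa [List.getElem?_eq_getElem hlt] using hr
      have hiltd : i + d < (l2.length : Int) := by omega
      by_cases hv : v = w
      · simp [hv, hnn, hiltd, hw]
      · have hc : ¬ (0 ≤ i + d ∧ i + d < (l2.length : Int) ∧ l2.getD (i + d).toNat 0 = v) := by
          rintro ⟨_, _, e⟩
          rw [List.getD_eq_getElem _ _ hlt, hw] at e
          exact hv e.symm
        simp only [hc, decide_false, Bool.false_eq_true, if_false]
        have hb : (v == w) = false := by simp [hv]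
        simp [hb]
    · have hc : ¬ (0 ≤ i + d ∧ i + d < (l2.length : Int) ∧ l2.getD (i + d).toNat 0 = v) := by
        rintro ⟨h1, _, _⟩; exact hnn h1
      simp only [hc, decide_false, Bool.false_eq_true, if_false]
      have hb : decide (0 ≤ i + d) = false := by simp [hnn]
      simp [hb]

-- countP over List.range = card of the filtered Finset.range
theorem countP_range_eq_card (n : Nat) (p : Nat → Bool) :
    (List.range n).countP p = ((Finset.range n).filter (fun k => p k = true)).card := by
  induction n with
  | zero => simp
  | succ m ih =>
    rw [List.range_succ, Finset.range_add_one, List.countP_append, ih, Finset.filter_insert]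
    by_cases h : p m = true <;> simp [h, Finset.card_insert_of_notMem]

-- the central reindexing: offsets d = -x..x around i vs. indices j of number_list2 in the window
theorem count_eq (l2 : List Int) (v x i : Int) :
    (List.range (x * 2 + 1).toNat).countP
        (fun (k : Nat) => decide (0 ≤ i - x + (k : Int) ∧ i - x + (k : Int) < l2.length ∧
                          l2.getD (i - x + (k : Int)).toNat 0 = v))
    = (List.range l2.length).countP
        (fun (j : Nat) => decide (l2.getD j 0 = v ∧ i - x ≤ (j : Int) ∧ (j : Int) ≤ i + x)) := by
  rw [countP_range_eq_card, countP_range_eq_card]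
  apply Finset.card_bij' (fun (k : Nat) (_ : k ∈ _) => (i - x + (k : Int)).toNat)
    (fun (j : Nat) (_ : j ∈ _) => ((j : Int) - (i - x)).toNat)
  · intro k hk
    simp only [Finset.mem_filter, Finset.mem_range, decide_eq_true_eq] at hk ⊢
    obtain ⟨hkr, h0, hlen, hval⟩ := hk
    have hj : ((i - x + (k : Int)).toNat : Int) = i - x + (k : Int) := by omega
    refine ⟨by omega, ?_, by omega, by omega⟩
    exact hval
  · intro j hj
    simp only [Finset.mem_filter, Finset.mem_range, decide_eq_true_eq] at hj ⊢
    obtain ⟨hjr, hval, hlo, hhi⟩ := hj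
    have hk : (((j : Int) - (i - x)).toNat : Int) = (j : Int) - (i - x) := by omega
    refine ⟨by omega, by omega, by omega, ?_⟩
    have : (i - x + (((j : Int) - (i - x)).toNat : Int)).toNat = j := by omega
    rw [this]
    exact hval
  · intro k hk
    simp only [Finset.mem_filter, Finset.mem_range, decide_eq_true_eq] at hk
    omega
  · intro j hj
    simp only [Finset.mem_filter, Finset.mem_range, decide_eq_true_eq] at hj
    omega

-- B's positions dict: the entry for v is the (increasing) list of indices of v in number_list2
theorem posD (l2 : List Int) (v : Int) :
    ((PySem.List.enumerate l2 0).foldl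
        (fun (d : PySem.Dict Int (List Int)) jw => d.modify jw.2 [] (· ++ [jw.1])) PySem.Dict.empty).getD v []
    = (((PySem.List.enumerate l2 0).filter (fun p => p.2 == v)).map (fun p => p.1)) := by
  have h1 : (PySem.List.enumerate l2 0).foldl
        (fun (d : PySem.Dict Int (List Int)) jw => d.modify jw.2 [] (· ++ [jw.1])) PySem.Dict.empty
      = ((PySem.List.enumerate l2 0).map Prod.swap).foldl
        (fun (d : PySem.Dict Int (List Int)) p => d.modify p.1 [] (· ++ [p.2])) PySem.Dict.empty := by
    rw [List.foldl_map]
    rfl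
  rw [h1, PySem.Dict.getD_foldl_modify_append]
  simp [List.filter_map, List.map_map, Function.comp_def, Prod.swap]

-- A's per-i inner loop, reduced to a replicate of a count over offsets
theorem innerA (l1 l2 : List Int) (x i : Int) (h0 : 0 ≤ i) (hl : i < (l1.length : Int)) (acc : List Int) :
    (PySem.List.pyRange 0 (PySem.List.len ((PySem.List.pyRange 0 (x * 2 + 1) 1).map (fun t => x * (-1) + t))) 1).foldl
      (fun acc2 j =>
        match PySem.List.pyGet? l1 i,
              PySem.List.pyGet? ((PySem.List.pyRange 0 (x * 2 + 1) 1).map (fun t => x * (-1) + t)) j with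
        | some v, some d =>
          match PySem.List.pyGet? l2 (i + d) with
          | some w => if v == w && decide (0 ≤ i + d) then acc2 ++ [i + 1] else acc2
          | none => acc2
        | _, _ => acc2) acc
    = acc ++ List.replicate
        ((List.range (x * 2 + 1).toNat).countP
          (fun (k : Nat) => decide (0 ≤ i - x + (k : Int) ∧ i - x + (k : Int) < l2.length ∧
                            l2.getD (i - x + (k : Int)).toNat 0 = PySem.List.pyGetD l1 i 0)))
        (i + 1) := by
  set y := (PySem.List.pyRange 0 (x * 2 + 1) 1).map (fun t => x * (-1) + t) with hy
  set v := PySem.List.pyGetD l1 i 0 with hv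
  have hget1 : PySem.List.pyGet? l1 i = some v := by
    rw [PySem.List.pyGet?_eq_some_getElem l1 h0 hl, hv,
        PySem.List.pyGetD_eq_getElem l1 0 h0 hl]
  have step1 : ∀ (a : List Int), ∀ j ∈ PySem.List.pyRange 0 (PySem.List.len y) 1,
      (match PySem.List.pyGet? l1 i, PySem.List.pyGet? y j with
        | some v, some d =>
          match PySem.List.pyGet? l2 (i + d) with
          | some w => if v == w && decide (0 ≤ i + d) then a ++ [i + 1] else a
          | none => a
        | _, _ => a)
      = (fun acc2 d =>
          if decide (0 ≤ i + d ∧ i + d < l2.length ∧ l2.getD (i + d).toNat 0 = v)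
            then acc2 ++ [i + 1] else acc2) a (PySem.List.pyGetD y j 0) := by
    intro a j hj
    rw [PySem.List.mem_pyRange_one] at hj
    have hj2 : j < (y.length : Int) := by simpa using hj.2
    rw [hget1, PySem.List.pyGet?_eq_some_getElem y hj.1 hj2,
        ← PySem.List.pyGetD_eq_getElem y 0 hj.1 hj2]
    exact matchA_eq l2 v i _ a
  rw [PySem.List.foldl_congr_mem _ _ _ _ (fun a j hj => step1 a j hj)]
  beta_reduce
  rw [PySem.List.foldl_pyRange_zero_pyGetD y 0
      (fun acc2 d => if decide (0 ≤ i + d ∧ i + d < (l2.length : Int) ∧ l2.getD (i + d).toNat 0 = v) = true then acc2 ++ [i + 1] else acc2) acc]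
  rw [PySem.List.foldl_append_if (fun d => decide (0 ≤ i + d ∧ i + d < l2.length ∧ l2.getD (i + d).toNat 0 = v)) (fun _ => i + 1)]
  rw [List.map_const', ← List.countP_eq_length_filter]
  congr 2
  rw [hy, List.countP_map, PySem.List.pyRange_one, List.countP_map]
  simp only [Int.sub_zero]
  apply List.countP_congr
  intro k hk
  simp only [Function.comp_apply]
  rw [show i + (x * (-1) + (0 + (k : Int))) = i - x + (k : Int) from by ring]

-- B's per-i inner loop, reduced to a replicate of a count over indices of number_list2
theorem innerB (l2 : List Int) (x i v : Int) (acc : List Int) :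
    ((((PySem.List.enumerate l2 0).filter (fun p => p.2 == v)).map (fun p => p.1)).foldl
      (fun acc2 j => if decide (i - x ≤ j ∧ j ≤ i + x) then acc2 ++ [i + 1] else acc2) acc)
    = acc ++ List.replicate
        ((List.range l2.length).countP
          (fun (j : Nat) => decide (l2.getD j 0 = v ∧ i - x ≤ (j : Int) ∧ (j : Int) ≤ i + x)))
        (i + 1) := by
  rw [PySem.List.foldl_append_if (fun j => decide (i - x ≤ j ∧ j ≤ i + x)) (fun _ => i + 1)]
  rw [List.map_const', ← List.countP_eq_length_filter]
  congr 2
  rw [List.countP_map, List.countP_filter, PySem.List.enumerate_eq_map_pyRange l2 0,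
      List.countP_map, PySem.List.pyRange_one, List.countP_map]
  simp only [Int.sub_zero, PySem.List.len_eq, Int.toNat_natCast]
  apply List.countP_congr
  intro k hk
  simp only [Function.comp_apply, zero_add, PySem.List.pyGetD_natCast, decide_eq_true_eq,
    Bool.and_eq_true, beq_iff_eq]
  constructor
  · rintro ⟨⟨h1, h2⟩, h3⟩; exact ⟨h3, h1, h2⟩
  · rintro ⟨h3, h1, h2⟩; exact ⟨⟨h1, h2⟩, h3⟩

-- ===== VERDICT (by name: the statement is the Claim_ definition above) =====
theorem fun4_spec : Claim_equal_fun4 := by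
  intro l1 l2 xl _ _
  show fun4 l1 l2 xl = fun4_alt l1 l2 xl
  simp only [fun4, fun4_alt]
  simp only [posD]
  rw [PySem.List.enumerate_eq_map_pyRange l1 0, List.foldl_map]
  apply PySem.List.foldl_congr_mem
  intro acc i hi
  rw [PySem.List.mem_pyRange_one] at hi
  have h2 : i < (l1.length : Int) := hi.2
  rw [innerA l1 l2 (PySem.List.pyGetD xl 1 0) i hi.1 h2 acc]
  rw [innerB l2 (PySem.List.pyGetD xl 1 0) i (PySem.List.pyGetD l1 i 0) acc]
  rw [count_eq]
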